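-- pv_equiv track=rewrite | github.com/asigalov61/midicap | midicap/fast_analyzer.py | _name_chord
-- ===== SOURCE A (Python) =====
-- from typing import Any, Dict, List, Optional, Tuple, Set
--
-- NOTE_NAMES = ["C", "C#", "D", "D#", "E", "F", "F#", "G", "G#", "A", "A#", "B"]
--
-- CHORD_TEMPLATES = {
--     "maj": [0, 4, 7], "min": [0, 3, 7], "dim": [0, 3, 6],
--     "aug": [0, 4, 8], "sus2": [0, 2, 7], "sus4": [0, 5, 7],
--     "maj7": [0, 4, 7, 11], "min7": [0, 3, 7, 10], "dom7": [0, 4, 7, 10],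
--     "dim7": [0, 3, 6, 9], "hdim7": [0, 3, 6, 10],
--     "maj9": [0, 4, 7, 11, 14], "min9": [0, 3, 7, 10, 14],
--     "dom9": [0, 4, 7, 10, 14], "add9": [0, 4, 7, 14],
--     "6": [0, 4, 7, 9], "min6": [0, 3, 7, 9],
-- }
--
-- def _name_chord(pcs: set) -> Optional[str]:
--     if len(pcs) < 2:
--         return None
--     # Try to match exact chord first
--     for root in range(12):
--         for quality, intervals in CHORD_TEMPLATES.items():
--             template = set((root + i) % 12 for i in intervals)
--             if template == pcs:
--                 return f"{NOTE_NAMES[root].lower()}{quality}"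
--     # Then try subset matching (for chords with extensions)
--     for root in range(12):
--         for quality, intervals in CHORD_TEMPLATES.items():
--             template = set((root + i) % 12 for i in intervals)
--             if template.issubset(pcs) and len(template) >= 3:
--                 return f"{NOTE_NAMES[root].lower()}{quality}"
--     return None
-- ===== SOURCE B (Python) =====
-- from typing import Optional
--
-- NOTE_NAMES = ["C", "C#", "D", "D#", "E", "F", "F#", "G", "G#", "A", "A#", "B"]
--
-- CHORD_TEMPLATES = {
--     "maj": [0, 4, 7], "min": [0, 3, 7], "dim": [0, 3, 6],
--     "aug": [0, 4, 8], "sus2": [0, 2, 7], "sus4": [0, 5, 7],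
--     "maj7": [0, 4, 7, 11], "min7": [0, 3, 7, 10], "dom7": [0, 4, 7, 10],
--     "dim7": [0, 3, 6, 9], "hdim7": [0, 3, 6, 10],
--     "maj9": [0, 4, 7, 11, 14], "min9": [0, 3, 7, 10, 14],
--     "dom9": [0, 4, 7, 10, 14], "add9": [0, 4, 7, 14],
--     "6": [0, 4, 7, 9], "min6": [0, 3, 7, 9],
-- }
--
-- def _chord_name(root: int, quality: str) -> str:
--     return NOTE_NAMES[root].lower() + quality
--
-- # All (root, quality, template-set) triples in A's scan order, computed once.
-- _TEMPLATES = [(root, quality, frozenset((root + i) % 12 for i in intervals))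
--               for root in range(12)
--               for quality, intervals in CHORD_TEMPLATES.items()]
--
-- # Exact-match index: sorted pitch-class tuple -> chord name; setdefault keeps the
-- # first (lowest-root) name for symmetric templates, matching the scan order.
-- _EXACT = {}
-- for root, quality, template in _TEMPLATES:
--     _EXACT.setdefault(tuple(sorted(template)), _chord_name(root, quality))
--
-- # Subset-match table, with the size filter applied once at build time.
-- _SUBSET = [(root, template, _chord_name(root, quality))
--            for root, quality, template in _TEMPLATES if len(template) >= 3]
--
-- def _name_chord(pcs: set) -> Optional[str]:
--     if len(pcs) < 2:
--         return None
--     name = _EXACT.get(tuple(sorted(pcs)))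
--     if name is not None:
--         return name
--     for root, template, name in _SUBSET:
--         if root in pcs and template <= pcs:
--             return name
--     return None
-- ===== Notes on version B (the rewrite author's own statement) =====
-- stated objective: alternative
-- what changed: B precomputes the 204 (root, quality, template) triples once, answers the exact-match pass with a single lookup in a dict keyed by the sorted pitch classes (built with setdefault so the first/lowest-root name wins), and runs the subset pass over a flat prebuilt table with the len>=3 filter applied at build time and a root-membership prune, instead of A's two nested root x template scans that rebuild every template set per call.
import Mathlib
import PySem

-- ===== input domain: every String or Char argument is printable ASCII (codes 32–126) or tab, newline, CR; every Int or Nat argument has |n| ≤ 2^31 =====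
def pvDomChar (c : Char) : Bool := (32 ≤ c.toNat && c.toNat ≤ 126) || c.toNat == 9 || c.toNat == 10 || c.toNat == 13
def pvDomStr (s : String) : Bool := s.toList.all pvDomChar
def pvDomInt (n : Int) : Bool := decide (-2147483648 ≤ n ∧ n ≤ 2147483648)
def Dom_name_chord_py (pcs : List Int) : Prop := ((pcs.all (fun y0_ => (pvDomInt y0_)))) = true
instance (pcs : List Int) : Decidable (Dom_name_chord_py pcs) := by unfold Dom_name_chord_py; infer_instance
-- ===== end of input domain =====

-- B replaces A's 204-template exact-match scan by a one-shot lookup in a precomputed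
-- table keyed by the sorted pitch classes, and flattens/prunes the subset scan over a
-- precomputed template list (alternative decomposition).

def NOTE_NAMES : List String :=
  ["C", "C#", "D", "D#", "E", "F", "F#", "G", "G#", "A", "A#", "B"]

def CHORD_TEMPLATES : List (String × List Int) :=
  [("maj", [0, 4, 7]), ("min", [0, 3, 7]), ("dim", [0, 3, 6]),
   ("aug", [0, 4, 8]), ("sus2", [0, 2, 7]), ("sus4", [0, 5, 7]),
   ("maj7", [0, 4, 7, 11]), ("min7", [0, 3, 7, 10]), ("dom7", [0, 4, 7, 10]),
   ("dim7", [0, 3, 6, 9]), ("hdim7", [0, 3, 6, 10]),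
   ("maj9", [0, 4, 7, 11, 14]), ("min9", [0, 3, 7, 10, 14]),
   ("dom9", [0, 4, 7, 10, 14]), ("add9", [0, 4, 7, 14]),
   ("6", [0, 4, 7, 9]), ("min6", [0, 3, 7, 9])]

-- ===== PORT A =====
def name_chord_py (pcs : List Int) : Option String :=
  if PySem.Set.len pcs < 2 then none
  else
    match (PySem.List.pyRange 0 12 1).findSome? (fun root =>
        CHORD_TEMPLATES.findSome? (fun qi =>
          let template : PySem.Set Int :=
            PySem.Set.ofList (qi.2.map (fun i => PySem.Int.mod (root + i) 12))
          if PySem.Set.equal template pcs then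
            some (PySem.Str.lower (PySem.List.pyGetD NOTE_NAMES root "") ++ qi.1)
          else none)) with
    | some name => some name
    | none =>
      (PySem.List.pyRange 0 12 1).findSome? (fun root =>
        CHORD_TEMPLATES.findSome? (fun qi =>
          let template : PySem.Set Int :=
            PySem.Set.ofList (qi.2.map (fun i => PySem.Int.mod (root + i) 12))
          if PySem.Set.issubset template pcs && decide (3 ≤ PySem.Set.len template) then
            some (PySem.Str.lower (PySem.List.pyGetD NOTE_NAMES root "") ++ qi.1)
          else none))

-- ===== PORT B =====
def pvChordName (root : Int) (quality : String) : String :=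
  PySem.Str.lower (PySem.List.pyGetD NOTE_NAMES root "") ++ quality

-- all (root, quality, template) triples, computed once, in A's scan order
def pvTemplates : List (Int × String × PySem.Set Int) :=
  (PySem.List.pyRange 0 12 1).flatMap (fun root =>
    CHORD_TEMPLATES.map (fun qi =>
      (root, qi.1, PySem.Set.ofList (qi.2.map (fun i => PySem.Int.mod (root + i) 12)))))

-- exact-match index: sorted pitch-class list -> chord name (setdefault keeps the first name)
def pvExact : PySem.Dict (List Int) String :=
  pvTemplates.foldl
    (fun d e => d.setdefault (PySem.List.sorted e.2.2 (fun x => x) false) (pvChordName e.1 e.2.1))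
    PySem.Dict.empty

-- subset-match table, with the size filter applied once at build time
def pvSubset : List (Int × PySem.Set Int × String) :=
  (pvTemplates.filter (fun e => decide (3 ≤ PySem.Set.len e.2.2))).map
    (fun e => (e.1, e.2.2, pvChordName e.1 e.2.1))

def name_chord_py_alt (pcs : List Int) : Option String :=
  if PySem.Set.len pcs < 2 then none
  else
    match pvExact.get? (PySem.List.sorted pcs (fun x => x) false) with
    | some name => some name
    | none =>
      pvSubset.findSome? (fun e =>
        if PySem.Set.contains pcs e.1 && PySem.Set.issubset e.2.1 pcs then some e.2.2 else none)

-- ===== PRECONDITION & SPEC =====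
-- Pre_ only requires pcs to be the encoding of a Python set (distinct elements);
-- a list with duplicates encodes no input of A, which takes a set.
def Pre_name_chord_py (pcs : List Int) : Prop := pcs.Nodup
instance (pcs : List Int) : Decidable (Pre_name_chord_py pcs) := by unfold Pre_name_chord_py; infer_instance
def pvWitness_name_chord_py : List Int := [0, 4, 7]

def Spec_name_chord_py (pcs : List Int) (out : Option String) : Prop := out = name_chord_py_alt pcs
instance (pcs : List Int) (out : Option String) : Decidable (Spec_name_chord_py pcs out) := by unfold Spec_name_chord_py; infer_instance

-- ===== CLAIM (what is proved, stated in full; the proofs are below) =====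
def Claim_equal_name_chord_py : Prop := ∀ (pcs : List Int), Dom_name_chord_py pcs → Pre_name_chord_py pcs → Spec_name_chord_py pcs (name_chord_py pcs)

-- ===== LEMMAS AND PROOFS =====

theorem pv_findSome?_flatMap {α β γ : Type} (l : List α) (g : α → List β) (f : β → Option γ) :
    (l.flatMap g).findSome? f = l.findSome? (fun a => (g a).findSome? f) := by
  induction l with
  | nil => rfl
  | cons a t ih =>
    simp only [List.flatMap_cons, List.findSome?_append, ih, List.findSome?_cons]
    cases (g a).findSome? f <;> rfl

theorem pv_findSome?_guard {α γ : Type} (l : List α) (p : α → Bool) (f : α → γ) :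
    (l.findSome? fun a => if p a then some (f a) else none) = (l.find? p).map f := by
  induction l with
  | nil => rfl
  | cons a t ih =>
    by_cases h : p a <;> simp [h, ih]

theorem pv_findSome?_filter {α γ : Type} (l : List α) (p : α → Bool) (f : α → Option γ) :
    (l.filter p).findSome? f = l.findSome? (fun a => if p a then f a else none) := by
  induction l with
  | nil => rfl
  | cons a t ih =>
    by_cases h : p a <;> simp [List.findSome?_cons, h, ih]

theorem pv_findSome?_congr {α γ : Type} {l : List α} {f g : α → Option γ}
    (h : ∀ a ∈ l, f a = g a) : l.findSome? f = l.findSome? g := by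
  induction l with
  | nil => rfl
  | cons a t ih =>
    simp only [List.findSome?_cons, h a (List.mem_cons_self ..)]
    cases g a with
    | some v => rfl
    | none => exact ih (fun x hx => h x (List.mem_cons_of_mem _ hx))

theorem pv_get?_foldl_setdefault {κ ν α : Type} [BEq κ] [LawfulBEq κ]
    (ps : List α) (key : α → κ) (val : α → ν) (d : PySem.Dict κ ν) (k : κ) :
    (ps.foldl (fun d e => PySem.Dict.setdefault d (key e) (val e)) d).get? k
      = (d.get? k).or ((ps.find? (fun e => key e == k)).map val) := by
  induction ps generalizing d with
  | nil => rw [List.foldl_nil, List.find?_nil, Option.map_none, Option.or_none]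
  | cons p ps ih =>
    rw [List.foldl_cons, ih, List.find?_cons]
    by_cases h : key p = k
    · rw [h, PySem.Dict.get?_setdefault_self]
      simp only [beq_self_eq_true]
      cases d.get? k <;> rfl
    · rw [PySem.Dict.get?_setdefault_of_ne _ _ (fun he => h he.symm),
        beq_eq_false_iff_ne.mpr h]

-- every template contains its root, has at least 3 pitch classes, and is duplicate-free
set_option maxRecDepth 16384 in
theorem pvTemplates_fact :
    ∀ e ∈ pvTemplates, e.1 ∈ e.2.2 ∧ 3 ≤ PySem.Set.len e.2.2 ∧ e.2.2.Nodup := by decide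

-- A's exact-match scan, flattened over pvTemplates
theorem pvA_exact_flat (pcs : List Int) :
    ((PySem.List.pyRange 0 12 1).findSome? (fun root =>
        CHORD_TEMPLATES.findSome? (fun qi =>
          let template : PySem.Set Int :=
            PySem.Set.ofList (qi.2.map (fun i => PySem.Int.mod (root + i) 12))
          if PySem.Set.equal template pcs then
            some (PySem.Str.lower (PySem.List.pyGetD NOTE_NAMES root "") ++ qi.1)
          else none)))
    = pvTemplates.findSome? (fun e =>
        if PySem.Set.equal e.2.2 pcs then some (pvChordName e.1 e.2.1) else none) := by
  rw [pvTemplates, pv_findSome?_flatMap]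
  refine pv_findSome?_congr (fun root _ => ?_)
  rw [List.findSome?_map]
  rfl

-- A's subset scan, flattened over pvTemplates
theorem pvA_subset_flat (pcs : List Int) :
    ((PySem.List.pyRange 0 12 1).findSome? (fun root =>
        CHORD_TEMPLATES.findSome? (fun qi =>
          let template : PySem.Set Int :=
            PySem.Set.ofList (qi.2.map (fun i => PySem.Int.mod (root + i) 12))
          if PySem.Set.issubset template pcs && decide (3 ≤ PySem.Set.len template) then
            some (PySem.Str.lower (PySem.List.pyGetD NOTE_NAMES root "") ++ qi.1)
          else none)))
    = pvTemplates.findSome? (fun e =>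
        if PySem.Set.issubset e.2.2 pcs && decide (3 ≤ PySem.Set.len e.2.2) then
          some (pvChordName e.1 e.2.1)
        else none) := by
  rw [pvTemplates, pv_findSome?_flatMap]
  refine pv_findSome?_congr (fun root _ => ?_)
  rw [List.findSome?_map]
  rfl

-- the exact passes agree on duplicate-free pcs
theorem pv_exact_eq (pcs : List Int) (hnd : pcs.Nodup) :
    pvExact.get? (PySem.List.sorted pcs (fun x => x) false)
    = pvTemplates.findSome? (fun e =>
        if PySem.Set.equal e.2.2 pcs then some (pvChordName e.1 e.2.1) else none) := by
  rw [pvExact, pv_get?_foldl_setdefault, PySem.Dict.get?_empty, Option.none_or,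
    ← pv_findSome?_guard]
  refine pv_findSome?_congr (fun e he => ?_)
  obtain ⟨hroot, hlen3, hnodup⟩ := pvTemplates_fact e he
  have h1 : (PySem.List.sorted e.2.2 (fun x => x) false = PySem.List.sorted pcs (fun x => x) false)
      ↔ PySem.Set.equal e.2.2 pcs = true := by
    rw [PySem.List.sorted_id_eq_sorted_id_iff_perm, List.perm_ext_iff_of_nodup hnodup hnd,
      PySem.Set.equal_iff]
  have h2 : ((PySem.List.sorted e.2.2 (fun x => x) false
        == PySem.List.sorted pcs (fun x => x) false) : Bool)
      = PySem.Set.equal e.2.2 pcs := by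
    cases hb : PySem.Set.equal e.2.2 pcs
    · simp only [beq_eq_false_iff_ne, ne_eq]
      intro hc
      rw [hb] at h1
      exact Bool.false_ne_true (h1.mp hc)
    · rw [beq_iff_eq]
      exact h1.mpr hb
  rw [h2]

-- the subset passes agree
theorem pv_subset_eq (pcs : List Int) :
    pvSubset.findSome? (fun e =>
      if PySem.Set.contains pcs e.1 && PySem.Set.issubset e.2.1 pcs then some e.2.2 else none)
    = pvTemplates.findSome? (fun e =>
        if PySem.Set.issubset e.2.2 pcs && decide (3 ≤ PySem.Set.len e.2.2) then
          some (pvChordName e.1 e.2.1)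
        else none) := by
  rw [pvSubset, List.findSome?_map, pv_findSome?_filter]
  refine pv_findSome?_congr (fun e he => ?_)
  obtain ⟨hroot, hlen3, _⟩ := pvTemplates_fact e he
  rw [decide_eq_true hlen3]
  simp only [Function.comp, Bool.and_true, if_true]
  by_cases hs : PySem.Set.issubset e.2.2 pcs = true
  · have hc : PySem.Set.contains pcs e.1 = true :=
      (PySem.Set.contains_iff pcs e.1).mpr ((PySem.Set.issubset_iff e.2.2 pcs).mp hs e.1 hroot)
    rw [hs, hc]
    rfl
  · rw [Bool.eq_false_iff.mpr hs]
    simp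

-- ===== VERDICT (by name: the statement is the Claim_ definition above) =====
theorem name_chord_py_spec : Claim_equal_name_chord_py := by
  intro pcs _ hnd
  unfold Spec_name_chord_py name_chord_py name_chord_py_alt
  split_ifs with h
  · rfl
  · rw [pvA_exact_flat, pvA_subset_flat, pv_exact_eq pcs hnd, pv_subset_eq]
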